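-- pv_equiv track=rewrite | github.com/RangelGasharov/Python_Basics | algorithms/edabit_currently_winning.py | currently_winning
-- ===== SOURCE A (Python) =====
-- def currently_winning(scores):
--     result = []
--     current_own_points = 0
--     current_opponent_points = 0
--     for i in range(0, len(scores) - 1, 2):
--         current_own_points += scores[i]
--         current_opponent_points += scores[i + 1]
--         if current_own_points > current_opponent_points:
--             result.append("Y")
--         elif current_own_points == current_opponent_points:
--             result.append("T")
--         else:
--             result.append("O")
--     return result
-- ===== SOURCE B (Python) =====
-- def currently_winning(scores):
--     def running(xs):
--         total, out = 0, []
--         for x in xs: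
--             total += x
--             out.append(total)
--         return out
--     own = running(scores[0::2])
--     opp = running(scores[1::2])
--     return ["Y" if a > b else "T" if a == b else "O" for a, b in zip(own, opp)]
-- ===== Notes on version B (the rewrite author's own statement) =====
-- stated objective: simpler
-- what changed: Replaces the index-based range(0,len-1,2) loop with three running accumulators by slicing the input into own/opponent halves, taking running totals of each, and zipping them into the verdict list.
import Mathlib
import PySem

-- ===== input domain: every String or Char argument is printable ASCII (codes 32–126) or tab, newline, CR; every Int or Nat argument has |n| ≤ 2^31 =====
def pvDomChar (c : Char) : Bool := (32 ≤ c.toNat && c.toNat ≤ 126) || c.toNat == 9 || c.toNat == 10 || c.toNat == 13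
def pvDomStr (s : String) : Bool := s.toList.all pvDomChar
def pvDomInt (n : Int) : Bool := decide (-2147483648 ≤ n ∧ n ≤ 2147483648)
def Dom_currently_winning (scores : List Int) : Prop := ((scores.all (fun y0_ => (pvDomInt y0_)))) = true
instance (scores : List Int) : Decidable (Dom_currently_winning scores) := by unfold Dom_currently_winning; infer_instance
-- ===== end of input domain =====

-- B computes the same verdicts by slicing into own/opponent halves, running totals, and a zip — chosen for simplicity; return value proved equal to A's.


-- ===== PORT A =====
-- scores[i] and scores[i+1] are always in range for i drawn from range(0, len-1, 2),
-- so the Python never raises; pyGetD's default 0 is unreachable.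
def currently_winning (scores : List Int) : List String :=
  ((PySem.List.pyRange 0 ((scores.length : Int) - 1) 2).foldl
    (fun (st : List String × Int × Int) i =>
      let own := st.2.1 + PySem.List.pyGetD scores i 0
      let opp := st.2.2 + PySem.List.pyGetD scores (i + 1) 0
      let res := if own > opp then st.1 ++ ["Y"]
                 else if own = opp then st.1 ++ ["T"]
                 else st.1 ++ ["O"]
      (res, own, opp))
    ([], 0, 0)).1

-- ===== PORT B =====
-- running(xs): a loop appending the growing total after each element
def pvRunning (xs : List Int) : List Int :=
  (xs.foldl (fun (st : Int × List Int) x => (st.1 + x, st.2 ++ [st.1 + x])) (0, [])).2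

-- scores[0::2] / scores[1::2]: step 2 is a nonzero literal, so slice? is always `some`; getD [] is exact
def currently_winning_alt (scores : List Int) : List String :=
  let own := pvRunning ((PySem.List.slice? scores (some 0) none 2).getD [])
  let opp := pvRunning ((PySem.List.slice? scores (some 1) none 2).getD [])
  (own.zip opp).map (fun p => if p.1 > p.2 then "Y" else if p.1 = p.2 then "T" else "O")

-- ===== PRECONDITION & SPEC =====
def Spec_currently_winning (scores : List Int) (out : List String) : Prop := out = currently_winning_alt scores
instance (scores : List Int) (out : List String) : Decidable (Spec_currently_winning scores out) := by unfold Spec_currently_winning; infer_instance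

-- ===== CLAIM (what is proved, stated in full; the proofs are below) =====
def Claim_equal_currently_winning : Prop := ∀ (scores : List Int), Dom_currently_winning scores → Spec_currently_winning scores (currently_winning scores)

-- ===== LEMMAS AND PROOFS =====

-- reference recursion: one verdict per complete (own, opponent) pair
def pvRef : List Int → Int → Int → List String
  | a :: b :: r, own, opp =>
      (if own + a > opp + b then "Y" else if own + a = opp + b then "T" else "O")
        :: pvRef r (own + a) (opp + b)
  | _, _, _ => []

def pvEvens : List Int → List Int
  | a :: _ :: r => a :: pvEvens r
  | l => l

def pvOdds : List Int → List Int
  | _ :: b :: r => b :: pvOdds r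
  | _ => []

def pvScan (t : Int) : List Int → List Int
  | [] => []
  | x :: r => (t + x) :: pvScan (t + x) r

theorem pvScan_foldl (xs : List Int) : ∀ (t : Int) (acc : List Int),
    xs.foldl (fun (st : Int × List Int) x => (st.1 + x, st.2 ++ [st.1 + x])) (t, acc)
      = (t + xs.sum, acc ++ pvScan t xs) := by
  induction xs with
  | nil => intro t acc; simp [pvScan]
  | cons x r ih =>
      intro t acc
      simp [List.foldl_cons, ih, pvScan, add_assoc]

theorem pvRunning_eq (xs : List Int) : pvRunning xs = pvScan 0 xs := by
  simp [pvRunning, pvScan_foldl]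

-- B's zip-of-running-totals equals the reference recursion
theorem pvZip_ref : ∀ (xs : List Int) (own opp : Int),
    ((pvScan own (pvEvens xs)).zip (pvScan opp (pvOdds xs))).map
        (fun p => if p.1 > p.2 then "Y" else if p.1 = p.2 then "T" else "O")
      = pvRef xs own opp
  | [], _, _ => by simp [pvEvens, pvOdds, pvScan, pvRef]
  | [a], _, _ => by simp [pvEvens, pvOdds, pvScan, pvRef]
  | a :: b :: r, own, opp => by
      simp only [pvEvens, pvOdds, pvScan, pvRef, List.zip_cons_cons, List.map_cons]
      exact congrArg _ (pvZip_ref r (own + a) (opp + b))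

-- scores[0::2] = pvEvens scores
theorem pvSlice_evens : ∀ (xs : List Int),
    PySem.List.slice? xs (some 0) none 2 = some (pvEvens xs)
  | [] => by simp [PySem.List.slice?, PySem.List.sliceIndices, pvEvens]
  | [a] => by simp [PySem.List.slice?, PySem.List.sliceIndices, pvEvens]
  | a :: b :: r => by
    have ih := pvSlice_evens r
    norm_num [PySem.List.slice?, PySem.List.sliceIndices] at ih ⊢
    have hmin : min (0:ℤ) (↑r.length + 1 + 1) = 0 := by omega
    rw [hmin]
    have hc : ((↑r.length + 1 + 1 - (0:ℤ) + 2 - 1) / 2).toNat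
        = (if 0 < r.length then (((r.length:ℤ) + 2 - 1) / 2).toNat else 0) + 1 := by
      split_ifs <;> omega
    rw [if_pos (by omega : (0:ℤ) ≤ ↑r.length + 1), hc, List.range_succ_eq_map,
        List.filterMap_cons, List.filterMap_map]
    have hidx : ∀ x : ℕ, ((0:ℤ) + 2 * ↑(Nat.succ x)).toNat = (2 * (x:ℤ)).toNat + 2 := by
      intro x; omega
    simp only [Function.comp_def, hidx]
    norm_num [pvEvens, ih]

-- scores[1::2] = pvOdds scores
theorem pvSlice_odds : ∀ (xs : List Int),
    PySem.List.slice? xs (some 1) none 2 = some (pvOdds xs)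
  | [] => by simp [PySem.List.slice?, PySem.List.sliceIndices, pvOdds]
  | [a] => by simp [PySem.List.slice?, PySem.List.sliceIndices, pvOdds]
  | [a, b] => by
      norm_num [PySem.List.slice?, PySem.List.sliceIndices, pvOdds, List.range_succ,
        List.filterMap_cons]
  | a :: b :: c :: r => by
    have ih := pvSlice_odds (c :: r)
    norm_num [PySem.List.slice?, PySem.List.sliceIndices] at ih ⊢
    have h2 : min (1:ℤ) (↑r.length + 1 + 1 + 1) = 1 := by omega
    rw [h2, if_pos (by omega : (0:ℤ) ≤ ↑r.length + 1)]
    have hc : ((↑r.length + 1 + 1 + 1 - (1:ℤ) + 2 - 1) / 2).toNat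
        = (if 0 < r.length then (((r.length:ℤ) + 2 - 1) / 2).toNat else 0) + 1 := by
      split_ifs <;> omega
    rw [hc, List.range_succ_eq_map, List.filterMap_cons, List.filterMap_map]
    have hidx : ∀ x : ℕ, ((1:ℤ) + 2 * ↑(Nat.succ x)).toNat = ((1:ℤ) + 2 * ↑x).toNat + 2 := by
      intro x; omega
    simp only [Function.comp_def, hidx]
    norm_num [pvOdds, ih]

theorem pvGetD_shift (l : List Int) (x y : Int) (i : Int) (hi : 0 ≤ i) :
    PySem.List.pyGetD (x :: y :: l) (i + 2) 0 = PySem.List.pyGetD l i 0 := by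
  rw [PySem.List.pyGetD_of_nonneg _ _ (by omega), PySem.List.pyGetD_of_nonneg _ _ hi]
  have h : (i + 2).toNat = i.toNat + 2 := by omega
  simp [h]

-- A's indexed fold equals the reference recursion
theorem pvA_ref : ∀ (xs : List Int) (own opp : Int) (acc : List String),
    ((PySem.List.pyRange 0 ((xs.length : Int) - 1) 2).foldl
      (fun (st : List String × Int × Int) i =>
        let own' := st.2.1 + PySem.List.pyGetD xs i 0
        let opp' := st.2.2 + PySem.List.pyGetD xs (i + 1) 0
        let res := if own' > opp' then st.1 ++ ["Y"]
                   else if own' = opp' then st.1 ++ ["T"]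
                   else st.1 ++ ["O"]
        (res, own', opp'))
      (acc, own, opp)).1 = acc ++ pvRef xs own opp
  | [], own, opp, acc => by
      norm_num [PySem.List.pyRange_of_pos 0 _ (by norm_num : (0:ℤ) < 2), pvRef]
  | [a], own, opp, acc => by
      norm_num [PySem.List.pyRange_of_pos 0 _ (by norm_num : (0:ℤ) < 2), pvRef]
  | a :: b :: r, own, opp, acc => by
      have ih := pvA_ref r
      norm_num [PySem.List.pyRange_of_pos 0 _ (by norm_num : (0:ℤ) < 2)] at ih ⊢
      have hc : (((r.length:ℤ) + 1 + 2 - 1) / 2).toNat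
          = (if 1 < r.length then (((r.length:ℤ) - 1 + 2 - 1) / 2).toNat else 0) + 1 := by
        split_ifs <;> omega
      rw [hc, List.range_succ_eq_map]
      simp only [List.map_cons, List.map_map, List.foldl_cons, List.foldl_map]
      simp only [List.foldl_map] at ih
      have ha : PySem.List.pyGetD (a :: b :: r) (2 * ((0:ℕ):ℤ)) 0 = a := by
        rw [PySem.List.pyGetD_of_nonneg _ _ (by norm_num)]; norm_num
      have hb : PySem.List.pyGetD (a :: b :: r) (2 * ((0:ℕ):ℤ) + 1) 0 = b := by
        rw [PySem.List.pyGetD_of_nonneg _ _ (by norm_num)]; norm_num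
      rw [ha, hb]
      simp only [Function.comp_def]
      have k1 : ∀ y : ℕ, PySem.List.pyGetD (a :: b :: r) (2 * ((Nat.succ y : ℕ) : ℤ)) 0
          = PySem.List.pyGetD r (2 * (y : ℤ)) 0 := by
        intro y
        have e1 : (2 * ((Nat.succ y : ℕ) : ℤ)) = 2 * (y : ℤ) + 2 := by push_cast; ring
        rw [e1, pvGetD_shift r a b _ (by omega)]
      have k2 : ∀ y : ℕ, PySem.List.pyGetD (a :: b :: r) (2 * ((Nat.succ y : ℕ) : ℤ) + 1) 0
          = PySem.List.pyGetD r (2 * (y : ℤ) + 1) 0 := by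
        intro y
        have e1 : (2 * ((Nat.succ y : ℕ) : ℤ) + 1) = (2 * (y : ℤ) + 1) + 2 := by push_cast; ring
        rw [e1, pvGetD_shift r a b _ (by omega)]
      simp only [k1, k2]
      rw [ih]
      simp only [pvRef]
      split_ifs <;> simp

-- ===== VERDICT (by name: the statement is the Claim_ definition above) =====
theorem currently_winning_spec : Claim_equal_currently_winning := by
  intro scores _
  unfold Spec_currently_winning currently_winning currently_winning_alt
  rw [pvSlice_evens, pvSlice_odds]
  simp only [Option.getD_some, pvRunning_eq]
  rw [pvZip_ref, pvA_ref]
  simp
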